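-- pv_equiv track=rewrite | github.com/VLadislav-Davidenko/PythonProjects | Problems/CubicNum.py | is_sum_of_cubes2
-- ===== SOURCE A (Python) =====
-- def is_sum_of_cubes2(s):
--     summ = 0
--     a = []
--     b = False
--     num = 0
--     res = ""
--     s += "-"
--     for i in s:
--         if num == 3:
--             if int(''.join(a)) in [0,1,153,370,371,407]:
--                 res += "".join(a) + " "
--                 summ += int(''.join(a))
--             a.clear()
--             b = False
--             num = 0
--         if i in "1234567890":
--             a.append(i)
--             num += 1
--             b = True
--         else:
--             if b:
--
--                 if int(''.join(a)) in [0,1,153,370,371,407]: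
--                     res += "".join(a) + " "
--                     summ += int(''.join(a))
--                 a.clear()
--                 num = 0
--                 b = False
--     if len(res) == 0:
--         return "Unlucky"
--     else:
--         return res + str(summ) + " Lucky"
-- ===== SOURCE B (Python) =====
-- def is_sum_of_cubes2(s):
--     # Phase 1: collect maximal digit runs.
--     runs = []
--     cur = ""
--     for ch in s:
--         if ch in "1234567890":
--             cur += ch
--         else:
--             if cur:
--                 runs.append(cur)
--             cur = ""
--     if cur:
--         runs.append(cur)
--     # Phase 2: split each run into 3-digit pieces and keep the narcissistic ones.
--     res = ""
--     summ = 0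
--     for run in runs:
--         while run:
--             piece, run = run[:3], run[3:]
--             if int(piece) in (0, 1, 153, 370, 371, 407):
--                 res += piece + " "
--                 summ += int(piece)
--     return res + str(summ) + " Lucky" if res else "Unlucky"
-- ===== Notes on version B (the rewrite author's own statement) =====
-- stated objective: simpler
-- what changed: Replaces A's single-pass five-variable flag automaton (with a duplicated inline flush block) by a two-phase decomposition: first collect maximal digit runs, then slice each run into 3-digit pieces and test each piece.
import Mathlib
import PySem

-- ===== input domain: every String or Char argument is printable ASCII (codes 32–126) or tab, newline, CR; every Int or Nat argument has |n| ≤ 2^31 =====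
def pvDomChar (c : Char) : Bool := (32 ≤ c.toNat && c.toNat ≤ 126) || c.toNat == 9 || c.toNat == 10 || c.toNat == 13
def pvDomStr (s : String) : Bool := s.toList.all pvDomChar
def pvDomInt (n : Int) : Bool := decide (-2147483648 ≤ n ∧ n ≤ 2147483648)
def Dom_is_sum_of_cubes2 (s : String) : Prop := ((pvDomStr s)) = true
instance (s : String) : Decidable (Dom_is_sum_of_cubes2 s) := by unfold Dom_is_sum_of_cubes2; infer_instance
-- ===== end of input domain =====

-- B replaces A's single-pass five-variable flag automaton by a simpler two-phase
-- decomposition (collect maximal digit runs, then slice each run into 3-digit pieces);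
-- same cost, objective: simpler.

-- ===== PORT A =====
-- shared vocabulary of both Pythons: the digit alphabet, the lucky list, int(''.join(a))
def pvDigits : List Char := ['1', '2', '3', '4', '5', '6', '7', '8', '9', '0']

def pvLucky : List Int := [0, 1, 153, 370, 371, 407]

-- int(''.join(a)); both programs only apply it to nonempty digit strings, where ofChars? is `some`
def pvInt (a : List Char) : Int := (PySem.Int.ofChars? a).getD 0

-- the body of A's `for i in s` loop; state = (summ, a, b, num, res), res kept as List Char
def stepA : (Int × List Char × Bool × Int × List Char) → Char → (Int × List Char × Bool × Int × List Char)
  | (summ, a, b, num, res), i =>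
    let (summ, a, b, num, res) :=
      if num == 3 then
        if pvInt a ∈ pvLucky then (summ + pvInt a, [], false, 0, res ++ a ++ [' '])
        else (summ, [], false, 0, res)
      else (summ, a, b, num, res)
    if pvDigits.contains i then (summ, a ++ [i], true, num + 1, res)
    else
      if b then
        if pvInt a ∈ pvLucky then (summ + pvInt a, [], false, 0, res ++ a ++ [' '])
        else (summ, [], false, 0, res)
      else (summ, a, b, num, res)

def is_sum_of_cubes2 (s : String) : String :=
  let cs := s.toList ++ ['-']                        -- s += "-"
  let r := cs.foldl stepA (0, [], false, 0, [])
  let summ := r.1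
  let res := r.2.2.2.2
  if res.length == 0 then "Unlucky"
  else String.mk (res ++ PySem.Int.toChars summ ++ [' ', 'L', 'u', 'c', 'k', 'y'])

-- ===== PORT B =====
-- phase 1 loop body: grow the current digit run, or close it off
def stepRuns (st : List (List Char) × List Char) (c : Char) : List (List Char) × List Char :=
  if pvDigits.contains c then (st.1, st.2 ++ [c])
  else if st.2 ≠ [] then (st.1 ++ [st.2], []) else (st.1, [])

-- the `if int(piece) in (…)` body of phase 2
def pvKeep (acc : List Char × Int) (piece : List Char) : List Char × Int :=
  if pvInt piece ∈ pvLucky then (acc.1 ++ piece ++ [' '], acc.2 + pvInt piece) else acc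

-- phase 2 inner `while run:` loop — piece, run = run[:3], run[3:]
def procRun (acc : List Char × Int) (run : List Char) : List Char × Int :=
  match run with
  | [] => acc
  | x :: y :: z :: rest => procRun (pvKeep acc [x, y, z]) rest
  | small => pvKeep acc small

def is_sum_of_cubes2_alt (s : String) : String :=
  let p := s.toList.foldl stepRuns ([], [])
  let runs := p.1 ++ (if p.2 ≠ [] then [p.2] else [])   -- final `if cur: runs.append(cur)`
  let r := runs.foldl procRun ([], 0)
  if r.1.length == 0 then "Unlucky"                     -- `if res` (empty-string test)
  else String.mk (r.1 ++ PySem.Int.toChars r.2 ++ [' ', 'L', 'u', 'c', 'k', 'y'])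

-- ===== PRECONDITION & SPEC =====
def Spec_is_sum_of_cubes2 (s : String) (out : String) : Prop := out = is_sum_of_cubes2_alt s
instance (s : String) (out : String) : Decidable (Spec_is_sum_of_cubes2 s out) := by unfold Spec_is_sum_of_cubes2; infer_instance

-- ===== CLAIM (what is proved, stated in full; the proofs are below) =====
def Claim_equal_is_sum_of_cubes2 : Prop := ∀ (s : String), Dom_is_sum_of_cubes2 s → Spec_is_sum_of_cubes2 s (is_sum_of_cubes2 s)

-- ===== LEMMAS AND PROOFS =====

-- flush a pending (possibly empty) chunk, as A does at a non-digit and at the end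
def pvFlush (acc : List Char × Int) (a : List Char) : List Char × Int :=
  if a = [] then acc else pvKeep acc a

-- eager reference semantics, matching A: flush the pending chunk `a` (|a| ≤ 3) at 3 digits,
-- at a non-digit and at the end; acc = (res, summ)
def specGoA (acc : List Char × Int) (a cs : List Char) : List Char × Int :=
  match cs with
  | [] => pvFlush acc a
  | c :: rest =>
    if c ∈ pvDigits then
      if a.length = 3 then specGoA (pvKeep acc a) [c] rest
      else specGoA acc (a ++ [c]) rest
    else specGoA (pvFlush acc a) [] rest

-- lazy reference semantics, matching B: accumulate the whole pending run, chunk it when it closes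
def specGo2 (acc : List Char × Int) (a cs : List Char) : List Char × Int :=
  match cs with
  | [] => procRun acc a
  | c :: rest =>
    if c ∈ pvDigits then specGo2 acc (a ++ [c]) rest
    else specGo2 (procRun acc a) [] rest

theorem procRun_small (acc : List Char × Int) (a : List Char) (ha : a.length ≤ 3) :
    procRun acc a = pvFlush acc a := by
  match a with
  | [] => simp [procRun, pvFlush]
  | [x] => simp [procRun, pvFlush]
  | [x, y] => simp [procRun, pvFlush]
  | [x, y, z] => simp [procRun, pvFlush, pvKeep]
  | x :: y :: z :: w :: rest => simp at ha; omega

theorem procRun_chunk (acc : List Char × Int) (a b : List Char) (ha : a.length = 3) :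
    procRun acc (a ++ b) = procRun (pvKeep acc a) b := by
  match a with
  | [x, y, z] => simp [procRun]

theorem specGo2_chunk (cs : List Char) : ∀ (a b : List Char) (acc : List Char × Int),
    a.length = 3 → specGo2 acc (a ++ b) cs = specGo2 (pvKeep acc a) b cs := by
  induction cs with
  | nil => intro a b acc ha; simp [specGo2, procRun_chunk _ _ _ ha]
  | cons c rest ih =>
    intro a b acc ha
    by_cases hc : c ∈ pvDigits
    · simp only [specGo2, hc, if_pos, List.append_assoc]
      exact ih a (b ++ [c]) acc ha
    · simp [specGo2, hc, procRun_chunk _ _ _ ha]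

theorem specGo2_eq_specGoA (cs : List Char) : ∀ (a : List Char) (acc : List Char × Int),
    a.length ≤ 3 → specGo2 acc a cs = specGoA acc a cs := by
  induction cs with
  | nil => intro a acc ha; simp [specGo2, specGoA, procRun_small _ _ ha]
  | cons c rest ih =>
    intro a acc ha
    by_cases hc : c ∈ pvDigits
    · by_cases h3 : a.length = 3
      · simp only [specGo2, specGoA, hc, if_pos, h3, if_true]
        rw [specGo2_chunk rest a [c] acc h3]
        exact ih [c] (pvKeep acc a) (by simp)
      · simp only [specGo2, specGoA, hc, if_pos, h3, if_false]
        exact ih (a ++ [c]) acc (by simp; omega)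
    · simp only [specGo2, specGoA, hc, if_neg, not_false_iff]
      rw [procRun_small _ _ ha]
      exact ih [] _ (by simp)

-- one step of A's loop, on an invariant state (b = !a.isEmpty, num = a.length)
theorem stepA_inv (c : Char) (a : List Char) (acc : List Char × Int) (ha : a.length ≤ 3) :
    stepA (acc.2, a, !a.isEmpty, (a.length : Int), acc.1) c =
      if c ∈ pvDigits then
        if a.length = 3 then
          ((pvKeep acc a).2, [c], !([c] : List Char).isEmpty, (([c] : List Char).length : Int),
            (pvKeep acc a).1)
        else (acc.2, a ++ [c], !(a ++ [c]).isEmpty, ((a ++ [c]).length : Int), acc.1)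
      else ((pvFlush acc a).2, ([] : List Char), !([] : List Char).isEmpty,
        ((([] : List Char)).length : Int), (pvFlush acc a).1) := by
  obtain ⟨res, summ⟩ := acc
  by_cases h3 : a.length = 3
  · match a, h3 with
    | [x, y, z], _ =>
      by_cases hl : pvInt [x, y, z] ∈ pvLucky <;>
        (simp [stepA, hl, pvKeep, pvFlush];
         all_goals split_ifs <;> first | rfl | (exfalso; first | omega | simp_all))
  · have h3' : (((a.length : Int)) == 3) = false := by
      simp only [beq_eq_false_iff_ne, ne_eq]; omega
    match a with
    | [] =>
      by_cases hl : pvInt [] ∈ pvLucky <;>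
        (simp [stepA, h3', hl, pvKeep, pvFlush];
         all_goals split_ifs <;> first | rfl | (exfalso; first | omega | simp_all))
    | x :: t =>
      by_cases hl : pvInt (x :: t) ∈ pvLucky <;>
        (simp [stepA, h3', hl, pvKeep, pvFlush];
         all_goals split_ifs <;> first | rfl | (exfalso; first | omega | simp_all))

-- A's fold realises specGoA
theorem foldA_eq_specGoA (cs : List Char) : ∀ (a : List Char) (acc : List Char × Int),
    a.length ≤ 3 →
    (cs ++ ['-']).foldl stepA (acc.2, a, !a.isEmpty, (a.length : Int), acc.1) =
      ((specGoA acc a cs).2, [], false, 0, (specGoA acc a cs).1) := by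
  induction cs with
  | nil =>
    intro a acc ha
    have hd : ('-' ∈ pvDigits) = False := by simp [pvDigits]
    have := stepA_inv '-' a acc ha
    simp only [hd, if_false] at this
    simp [this, specGoA]
  | cons c rest ih =>
    intro a acc ha
    rw [List.cons_append, List.foldl_cons, stepA_inv c a acc ha]
    by_cases hc : c ∈ pvDigits
    · by_cases h3 : a.length = 3
      · simp only [hc, if_pos, h3, if_true, specGoA]
        exact ih [c] (pvKeep acc a) (by simp)
      · simp only [hc, if_pos, h3, if_false, specGoA]
        exact ih (a ++ [c]) acc (by simp; omega)
    · simp only [hc, if_neg, not_false_iff, specGoA]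
      exact ih [] (pvFlush acc a) (by simp)

-- B's two folds realise specGo2
theorem foldB_eq_specGo2 (cs : List Char) : ∀ (rs : List (List Char)) (cur : List Char)
    (acc : List Char × Int),
    (((cs.foldl stepRuns (rs, cur)).1 ++
        (if (cs.foldl stepRuns (rs, cur)).2 ≠ [] then [(cs.foldl stepRuns (rs, cur)).2] else [])).foldl
      procRun acc) = specGo2 (rs.foldl procRun acc) cur cs := by
  induction cs with
  | nil =>
    intro rs cur acc
    by_cases h : cur = []
    · simp [h, specGo2, procRun]
    · simp [h, specGo2, List.foldl_append]
  | cons c rest ih =>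
    intro rs cur acc
    by_cases hc : c ∈ pvDigits
    · simp only [List.foldl_cons, stepRuns, hc, List.contains_eq_mem, decide_true, if_true, specGo2, if_pos]
      exact ih rs (cur ++ [c]) acc
    · have hc' : pvDigits.contains c = false := by simp [hc]
      by_cases h : cur = []
      · simp only [List.foldl_cons, stepRuns, hc', Bool.false_eq_true, if_false, h,
          ne_eq, not_true_eq_false, if_neg, not_false_eq_true, specGo2, hc]
        rw [ih rs [] acc]
        simp [procRun]
      · simp only [List.foldl_cons, stepRuns, hc', Bool.false_eq_true, if_false, h,
          ne_eq, not_false_eq_true, if_pos, specGo2, hc, if_neg]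
        rw [ih (rs ++ [cur]) [] acc]
        simp [List.foldl_append, procRun]

-- ===== VERDICT (by name: the statement is the Claim_ definition above) =====
theorem is_sum_of_cubes2_spec : Claim_equal_is_sum_of_cubes2 := by
  intro s _
  unfold Spec_is_sum_of_cubes2 is_sum_of_cubes2 is_sum_of_cubes2_alt
  have hA := foldA_eq_specGoA s.toList [] ([], 0) (by simp)
  have hB := foldB_eq_specGo2 s.toList [] [] ([], 0)
  have hC := specGo2_eq_specGoA s.toList [] ([], 0) (by simp)
  simp only [List.isEmpty_nil, Bool.not_true, List.length_nil, Nat.cast_zero] at hA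
  simp only [List.foldl_nil] at hB
  simp only [hA, hB, hC]
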